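-- pv_equiv track=rewrite | github.com/selfreferencing/erdos-86-lean | Zeroless/exp5_carry_invariants.py | get_carry_chain
-- ===== SOURCE A (Python) =====
-- def get_carry_chain(n):
--     """
--     Compute the carry chain when doubling 2^{n-1} to get 2^n.
--     Returns (digits_prev, digits_result, carries) all LSB-first.
--     """
--     prev = pow(2, n - 1)
--     prev_digits = [int(c) for c in str(prev)][::-1]
--
--     carry = 0
--     result_digits = []
--     carries = []
--
--     for d in prev_digits:
--         s = 2 * d + carry
--         result_digits.append(s % 10)
--         carry = s // 10
--         carries.append(carry)
--
--     if carry > 0: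
--         result_digits.append(carry)
--         carries.append(0)  # No further carry
--
--     return prev_digits, result_digits, carries
-- ===== SOURCE B (Python) =====
-- def get_carry_chain(n):
--     """
--     Carry chain of doubling 2^{n-1}: when doubling, the carry out of a digit
--     is 1 exactly when that digit is >= 5, independent of the incoming carry,
--     so both output lists are plain maps instead of a sequential carry loop.
--     """
--     prev_digits = [int(c) for c in str(pow(2, n - 1))][::-1]
--     carries = [1 if d >= 5 else 0 for d in prev_digits]
--     result_digits = [(2 * d + cin) % 10 for d, cin in zip(prev_digits, [0] + carries)]
--     if carries and carries[-1] == 1: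
--         result_digits.append(1)
--         carries.append(0)
--     return prev_digits, result_digits, carries
-- ===== Notes on version B (the rewrite author's own statement) =====
-- stated objective: alternative
-- what changed: Replaces A's sequential carry-propagation fold by two independent maps, using the fact that when doubling the carry out of a digit is 1 iff the digit is >= 5, independent of the incoming carry; result digits then come from zipping the digits with the shifted carry list.
import Mathlib
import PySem

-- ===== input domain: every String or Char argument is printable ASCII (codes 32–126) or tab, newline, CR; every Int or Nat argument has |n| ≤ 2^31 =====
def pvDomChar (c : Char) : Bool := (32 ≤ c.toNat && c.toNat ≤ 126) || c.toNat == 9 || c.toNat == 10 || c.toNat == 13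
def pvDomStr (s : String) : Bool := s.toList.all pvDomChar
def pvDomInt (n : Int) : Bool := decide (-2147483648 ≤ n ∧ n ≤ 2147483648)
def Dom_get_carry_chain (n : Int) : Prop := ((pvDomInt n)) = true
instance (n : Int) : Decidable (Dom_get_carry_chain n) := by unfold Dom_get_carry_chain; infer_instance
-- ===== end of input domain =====

-- B replaces A's sequential carry-propagation loop by two independent maps
-- (carry out of a doubled digit is 1 iff the digit is >= 5); alternative, not faster.


-- ===== PORT A =====
-- prev_digits = [int(c) for c in str(2**(n-1))][::-1]; int(c) is ported with
-- PySem.Int.ofChars? (total via .getD 0, exact under Pre_: every char is a digit);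
-- pow(2, n-1) is 2 ^ (n-1).toNat, exact for n ≥ 1 (Pre_; for n ≤ 0 Python raises).
def pvPrevDigits (n : Int) : List Int :=
  (PySem.List.slice?
    ((PySem.Int.toChars (2 ^ (n - 1).toNat)).map
      (fun c => (PySem.Int.ofChars? [c]).getD 0)) none none (-1)).getD []

def get_carry_chain (n : Int) : List Int × List Int × List Int :=
  let prev_digits := pvPrevDigits n
  -- for d in prev_digits: s = 2*d + carry; result.append(s % 10); carry = s // 10; carries.append(carry)
  let st := prev_digits.foldl
    (fun (st : Int × List Int × List Int) d =>
      let s := 2 * d + st.1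
      (PySem.Int.floordiv s 10,
       st.2.1 ++ [PySem.Int.mod s 10],
       st.2.2 ++ [PySem.Int.floordiv s 10]))
    (0, [], [])
  if st.1 > 0 then (prev_digits, st.2.1 ++ [st.1], st.2.2 ++ [0])
  else (prev_digits, st.2.1, st.2.2)

-- ===== PORT B =====
def get_carry_chain_alt (n : Int) : List Int × List Int × List Int :=
  let prev_digits := pvPrevDigits n
  let carries := prev_digits.map (fun d => if d ≥ 5 then (1 : Int) else 0)
  let result_digits := (prev_digits.zip (0 :: carries)).map
    (fun p => PySem.Int.mod (2 * p.1 + p.2) 10)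
  -- if carries and carries[-1] == 1:
  if carries ≠ [] ∧ PySem.List.pyGetD carries (-1) 0 = 1 then
    (prev_digits, result_digits ++ [1], carries ++ [0])
  else (prev_digits, result_digits, carries)

-- ===== PRECONDITION & SPEC =====
-- Pre_: for n ≤ 0, pow(2, n-1) is a float and A raises ValueError on int('.').
def Pre_get_carry_chain (n : Int) : Prop := 1 ≤ n
instance (n : Int) : Decidable (Pre_get_carry_chain n) := by unfold Pre_get_carry_chain; infer_instance
def pvWitness_get_carry_chain : Int := 5

def Spec_get_carry_chain (n : Int) (out : List Int × List Int × List Int) : Prop := out = get_carry_chain_alt n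
instance (n : Int) (out : List Int × List Int × List Int) : Decidable (Spec_get_carry_chain n out) := by unfold Spec_get_carry_chain; infer_instance

-- ===== CLAIM (what is proved, stated in full; the proofs are below) =====
def Claim_equal_get_carry_chain : Prop := ∀ (n : Int), Dom_get_carry_chain n → Pre_get_carry_chain n → Spec_get_carry_chain n (get_carry_chain n)

-- ===== LEMMAS AND PROOFS =====

-- int(c) on a single decimal digit character
theorem pv_ofChars_digit (c : Char) (h1 : 48 ≤ c.toNat) (h2 : c.toNat ≤ 57) :
    PySem.Int.ofChars? [c] = some ((c.toNat : Int) - 48) := by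
  have hc : Char.ofNat c.toNat = c := Char.ofNat_toNat c
  set k := c.toNat with hk
  interval_cases k <;> (rw [← hc]; decide)

-- every character of str(m) for m ≥ 0 is a decimal digit
theorem pv_toChars_digit (m : Int) (hm : 0 ≤ m) (c : Char)
    (hc : c ∈ PySem.Int.toChars m) : 48 ≤ c.toNat ∧ c.toNat ≤ 57 := by
  unfold PySem.Int.toChars at hc
  rw [if_neg (by omega)] at hc
  have h := Nat.isDigit_of_mem_toDigits (b := 10) (by norm_num) (by norm_num) hc
  simp only [Char.isDigit, Bool.and_eq_true, decide_eq_true_eq] at h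
  obtain ⟨h1, h2⟩ := h
  rw [ge_iff_le] at h1
  exact ⟨UInt32.le_iff_toNat_le.mp h1, UInt32.le_iff_toNat_le.mp h2⟩

-- every element of pvPrevDigits n is in [0, 9]
theorem pv_prevDigits_bounds (n : Int) (d : Int) (hd : d ∈ pvPrevDigits n) :
    0 ≤ d ∧ d ≤ 9 := by
  unfold pvPrevDigits at hd
  rw [PySem.List.slice?_none_none_neg_one] at hd
  simp only [Option.getD_some, List.mem_reverse, List.mem_map] at hd
  obtain ⟨c, hc, hdc⟩ := hd
  obtain ⟨h1, h2⟩ := pv_toChars_digit _ (by positivity) c hc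
  rw [pv_ofChars_digit c h1 h2, Option.getD_some] at hdc
  omega

-- the A-loop, characterised: final carry, result digits, carry list
theorem pv_loopA (ds : List Int) (c : Int) (res cs : List Int)
    (hc : c = 0 ∨ c = 1) (hds : ∀ d ∈ ds, 0 ≤ d ∧ d ≤ 9) :
    ds.foldl
      (fun (st : Int × List Int × List Int) d =>
        let s := 2 * d + st.1
        (PySem.Int.floordiv s 10,
         st.2.1 ++ [PySem.Int.mod s 10],
         st.2.2 ++ [PySem.Int.floordiv s 10]))
      (c, res, cs)
    = ((ds.map (fun d => if d ≥ 5 then (1 : Int) else 0)).getLastD c,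
       res ++ (ds.zip (c :: ds.map (fun d => if d ≥ 5 then (1 : Int) else 0))).map
         (fun p => PySem.Int.mod (2 * p.1 + p.2) 10),
       cs ++ ds.map (fun d => if d ≥ 5 then (1 : Int) else 0)) := by
  induction ds generalizing c res cs with
  | nil => simp
  | cons d t ih =>
    have hd := hds d (by simp)
    have hcar : PySem.Int.floordiv (2 * d + c) 10 = if d ≥ 5 then (1 : Int) else 0 := by
      rw [PySem.Int.floordiv_eq_iff_of_pos (by norm_num)]
      split_ifs <;> omega
    simp only [List.foldl_cons, List.map_cons, List.zip_cons_cons, List.getLastD_cons]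
    rw [ih _ _ _ (by rw [hcar]; split_ifs <;> simp) (fun d hd => hds d (by simp [hd]))]
    have hcar2 : (2 * d + c) / 10 = if (5:Int) ≤ d then 1 else 0 := by split_ifs <;> omega
    simp [hcar2]

-- ===== VERDICT (by name: the statement is the Claim_ definition above) =====
theorem pv_tail_eq (ds R cs : List Int) (h01 : ∀ x ∈ cs, x = 0 ∨ x = 1) :
    (if cs.getLastD 0 > 0 then (ds, R ++ [cs.getLastD 0], cs ++ [0]) else (ds, R, cs))
      = if cs ≠ [] ∧ PySem.List.pyGetD cs (-1) 0 = 1 then (ds, R ++ [(1:Int)], cs ++ [0])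
        else (ds, R, cs) := by
  by_cases hne : cs = []
  · subst hne; simp
  · have hlast : cs.getLastD 0 = cs.getLast hne := by
      rw [List.getLastD_eq_getLast?, List.getLast?_eq_some_getLast hne, Option.getD_some]
    rw [hlast, PySem.List.pyGetD_neg_one cs 0 hne]
    rcases h01 _ (List.getLast_mem hne) with h | h <;> simp [h, hne]

theorem get_carry_chain_spec : Claim_equal_get_carry_chain := by
  intro n _ _
  unfold Spec_get_carry_chain get_carry_chain get_carry_chain_alt
  dsimp only
  rw [pv_loopA _ 0 [] [] (Or.inl rfl) (pv_prevDigits_bounds n)]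
  dsimp only
  simp only [List.nil_append]
  exact pv_tail_eq _ _ _ (by
    intro x hx
    obtain ⟨d, _, hdg⟩ := List.mem_map.mp hx
    rw [← hdg]; split_ifs <;> simp)
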